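-- pv_equiv track=rewrite | github.com/kuznetsovvj/education | algorithms/tkf-2024-fall/p1/i.py | check
-- ===== SOURCE A (Python) =====
-- def check(n, cmd):
--     l = [0 for _ in range(n)]
--     ans = [0 for _ in range(n+1)]
--     ans[0] = 1
--     i = 1
--     start = len(l) - 1
--     for c in cmd:
--         if i == len(ans) - 1:
--             ans[i] = 1
--             break
--         l[c-1] = 1
--         # если мы не трогали самый правый ноль, то могла только увеличиться сумма на 1
--         if c-1 != start:
--             ans[i] = ans[i-1] + 1
--             i += 1
--         else:
--         # если мы тронули самый правый ноль, то надо найти новый ноль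
--             j = start
--             r = 0
--             while l[j] != 0 and j > 0:
--                 r += 1
--                 j -= 1
--             start = j
--             ans[i] = ans[i-1] - r + 1
--             i += 1
--
--     return ' '.join(map(str, ans))
-- ===== SOURCE B (Python) =====
-- def check(n, cmd):
--     ans = [0] * (n + 1)
--     ans[0] = 1
--     if n >= 1:
--         INF = n
--         t = [INF] * n
--         for k, c in enumerate(cmd[:n-1], 1):
--             if t[c-1] == INF:
--                 t[c-1] = k
--         m = min(len(cmd), n - 1)
--         s = n - 1
--         for k in range(1, m + 1):
--             while s >= 0 and t[s] <= k:
--                 s -= 1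
--             ans[k] = max(s, 0) + k + 2 - n
--         if len(cmd) >= n:
--             ans[n] = 1
--     return ' '.join(map(str, ans))
-- ===== Notes on version B (the rewrite author's own statement) =====
-- stated objective: alternative
-- what changed: Replaces A's online simulation (occupancy array, running accumulator ans[i-1]+/-r, branch on touching the rightmost zero with an inner rescan) by two staged offline passes: first build a first-fill-time array for the slots, then sweep k=1..m with a monotone pointer over the fill times and write each answer directly from the closed formula max(s,0)+k+2-n.
-- outside the precondition, e.g. on check(3, [0]): A returns '1 2 0 0', B returns '1 1 0 0'
import Mathlib
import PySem

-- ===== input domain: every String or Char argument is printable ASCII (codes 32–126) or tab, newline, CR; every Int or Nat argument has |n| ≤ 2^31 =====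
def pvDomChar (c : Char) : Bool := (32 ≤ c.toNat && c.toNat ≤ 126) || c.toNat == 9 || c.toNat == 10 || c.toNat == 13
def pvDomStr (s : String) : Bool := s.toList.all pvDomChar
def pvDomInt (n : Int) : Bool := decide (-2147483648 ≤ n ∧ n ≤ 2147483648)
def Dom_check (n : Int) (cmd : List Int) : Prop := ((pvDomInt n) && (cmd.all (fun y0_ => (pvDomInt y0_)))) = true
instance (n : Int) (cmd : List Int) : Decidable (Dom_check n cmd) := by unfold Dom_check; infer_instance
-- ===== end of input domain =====

-- B replaces A's online simulation (occupancy array + running accumulator + rescans) by two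
-- offline passes: a first-fill-time array, then a monotone-pointer sweep writing each answer
-- from the closed formula max(s,0)+k+2-n (objective: alternative algorithm, same cost).

-- ===== PORT A =====
-- the inner `while l[j] != 0 and j > 0: r += 1; j -= 1` loop (j is a Nat here; returns (j, r))
def scanA (l : List Int) : Nat → Int → Nat × Int
  | 0, r => (0, r)
  | j+1, r =>
    if PySem.List.pyGetD l ((j : Int)+1) 0 ≠ 0 then scanA l j (r+1) else (j+1, r)

-- the `for c in cmd` loop with state (l, ans, i, start); `break` = return ans after setting ans[i]
def loopA : List Int → List Int → List Int → Int → Int → List Int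
  | [], _, ans, _, _ => ans
  | c :: cs, l, ans, i, start =>
    if i = (ans.length : Int) - 1 then PySem.List.pySetD ans i 1
    else
      let l' := PySem.List.pySetD l (c-1) 1
      if c - 1 ≠ start then
        loopA cs l' (PySem.List.pySetD ans i (PySem.List.pyGetD ans (i-1) 0 + 1)) (i+1) start
      else
        let jr := scanA l' start.toNat 0
        loopA cs l' (PySem.List.pySetD ans i (PySem.List.pyGetD ans (i-1) 0 - jr.2 + 1)) (i+1) (jr.1 : Int)

def check (n : Int) (cmd : List Int) : String :=
  let l : List Int := List.replicate n.toNat 0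
  let ans0 : List Int := PySem.List.pySetD (List.replicate (n+1).toNat 0) 0 1
  let ans := loopA cmd l ans0 1 ((l.length : Int) - 1)
  PySem.Str.join " " (ans.map PySem.Int.toStr)

-- ===== PORT B =====
-- pass 1 body: `if t[c-1] == INF: t[c-1] = k`  (INF = n)
def fillStep (n : Int) (t : List Int) (kc : Int × Int) : List Int :=
  if PySem.List.pyGetD t (kc.2 - 1) 0 == n then PySem.List.pySetD t (kc.2 - 1) kc.1 else t

-- pass 2 inner `while s >= 0 and t[s] <= k: s -= 1`, fuel = s+1 (result -1 when it runs out)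
def dropF (t : List Int) (k : Int) : Nat → Int
  | 0 => -1
  | j+1 => if PySem.List.pyGetD t ((j : Nat) : Int) 0 ≤ k then dropF t k j else ((j : Nat) : Int)

-- pass 2 body: move the pointer, then write ans[k] from the closed formula
def sweep (n : Int) (t : List Int) (st : Int × List Int) (k : Int) : Int × List Int :=
  let s' := dropF t k (st.1 + 1).toNat
  (s', PySem.List.pySetD st.2 k (max s' 0 + k + 2 - n))

def check_alt (n : Int) (cmd : List Int) : String :=
  let ans0 : List Int := PySem.List.pySetD (List.replicate (n+1).toNat 0) 0 1
  let ans :=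
    if 1 ≤ n then
      let t := (PySem.List.enumerate (PySem.List.slice cmd none (some (n-1))) 1).foldl
        (fillStep n) (List.replicate n.toNat n)
      let m : Int := min (cmd.length : Int) (n - 1)
      let st := (PySem.List.pyRange 1 (m+1) 1).foldl (sweep n t) (n-1, ans0)
      if (cmd.length : Int) ≥ n then PySem.List.pySetD st.2 n 1 else st.2
    else ans0
  PySem.Str.join " " (ans.map PySem.Int.toStr)

-- ===== PRECONDITION & SPEC =====
-- Pre_ excludes the inputs where A raises IndexError (negative n; n = 0 with commands to run; an
-- executed command below 1-n or above n) and restricts the executed commands to the task's natural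
-- 1-based slot range 1..n: on commands in [1-n, 0] A still returns, but via Python's negative-index
-- wraparound, which desynchronizes its rightmost-zero pointer (see claim.json cite).
def Pre_check (n : Int) (cmd : List Int) : Prop :=
  0 ≤ n ∧ (n = 0 → cmd = []) ∧ ∀ c ∈ cmd.take (n-1).toNat, 1 ≤ c ∧ c ≤ n
instance (n : Int) (cmd : List Int) : Decidable (Pre_check n cmd) := by
  unfold Pre_check; infer_instance
def pvWitness_check : Int × List Int := (4, [2, 4, 1, 3])

def Spec_check (n : Int) (cmd : List Int) (out : String) : Prop := out = check_alt n cmd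
instance (n : Int) (cmd : List Int) (out : String) : Decidable (Spec_check n cmd out) := by
  unfold Spec_check; infer_instance

-- ===== CLAIM (what is proved, stated in full; the proofs are below) =====
def Claim_equal_check : Prop := ∀ (n : Int) (cmd : List Int), Dom_check n cmd → Pre_check n cmd → Spec_check n cmd (check n cmd)

-- ===== LEMMAS AND PROOFS =====

-- basic bounds of the pointer move
lemma dropF_bounds (t : List Int) (k : Int) : ∀ f : Nat, -1 ≤ dropF t k f ∧ dropF t k f < (f : Int) := by
  intro f
  induction f with
  | zero => simp [dropF]
  | succ j ih =>
    simp only [dropF]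
    split_ifs with h
    · exact ⟨ih.1, by push_cast; omega⟩
    · constructor <;> push_cast <;> omega

-- where the pointer stops, the fill time exceeds k
lemma dropF_pos (t : List Int) (k : Int) : ∀ f : Nat, 0 ≤ dropF t k f →
    k < PySem.List.pyGetD t (dropF t k f) 0 := by
  intro f
  induction f with
  | zero => intro h; simp [dropF] at h
  | succ j ih =>
    simp only [dropF]
    split_ifs with h
    · exact ih
    · intro _; omega

-- everything strictly between the stop position and the fuel is filled by time k
lemma dropF_above (t : List Int) (k : Int) : ∀ (f : Nat) (j : Nat),
    dropF t k f < (j : Int) → j < f → PySem.List.pyGetD t (j : Int) 0 ≤ k := by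
  intro f
  induction f with
  | zero => intro j _ hj; omega
  | succ i ih =>
    intro j h1 h2
    simp only [dropF] at h1
    split_ifs at h1 with ht
    · by_cases hj : j = i
      · subst hj; exact ht
      · exact ih j h1 (by omega)
    · omega

-- the occupancy/fill-time dictionary: `l[j] ≠ 0 ↔ t[j] ≤ K` turns A's rescan into B's pointer move
lemma scanA_dropF (l t : List Int) (K : Int) :
    ∀ (s : Nat) (r : Int),
      (∀ j : Nat, j ≤ s → (PySem.List.pyGetD l (j : Int) 0 ≠ 0 ↔ PySem.List.pyGetD t (j : Int) 0 ≤ K)) →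
      PySem.List.pyGetD l (s : Int) 0 ≠ 0 →
      scanA l s r = ((max (dropF t K s) 0).toNat, r + (s : Int) - max (dropF t K s) 0) := by
  intro s
  induction s with
  | zero =>
    intro r _ _
    simp [scanA, dropF]
  | succ s ih =>
    intro r H hl
    have hcast : (((s + 1 : Nat)) : Int) = (s : Int) + 1 := by push_cast; ring
    have hstep : scanA l (s+1) r = if PySem.List.pyGetD l ((s : Int)+1) 0 ≠ 0 then scanA l s (r+1) else (s+1, r) := rfl
    rw [hstep, if_pos (by rw [← hcast]; exact hl)]
    simp only [dropF]
    by_cases ht : PySem.List.pyGetD t ((s : Nat) : Int) 0 ≤ K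
    · rw [if_pos ht]
      have hl' : PySem.List.pyGetD l ((s : Nat) : Int) 0 ≠ 0 := (H s (by omega)).mpr ht
      rw [ih (r+1) (fun j hj => H j (by omega)) hl']
      refine Prod.ext rfl ?_
      simp only
      rw [hcast]; ring
    · rw [if_neg ht]
      have hl0 : PySem.List.pyGetD l ((s : Nat) : Int) 0 = 0 := by
        by_contra h; exact ht ((H s (by omega)).mp h)
      have hmax : max ((s : Nat) : Int) 0 = (s : Int) := by omega
      have hout : scanA l s (r+1) = (s, r+1) := by
        cases s with
        | zero => simp [scanA]
        | succ s' =>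
          have : scanA l (s'+1) (r+1) = if PySem.List.pyGetD l ((s' : Int)+1) 0 ≠ 0 then scanA l s' (r+1+1) else (s'+1, r+1) := rfl
          rw [this, if_neg]
          simp only [ne_eq, not_not]
          rw [show (s' : Int)+1 = (((s'+1 : Nat)) : Int) from by push_cast; ring]
          exact hl0
      rw [hout]
      refine Prod.ext ?_ ?_
      · simp only [hmax]; omega
      · simp only [hmax]; rw [hcast]; ring

-- index bookkeeping for a write at a canonical position
lemma getD_pySetD_int (xs : List Int) (i v : Int) (j : Nat) (hi : 0 ≤ i) (hil : i < (xs.length : Int)) :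
    PySem.List.pyGetD (PySem.List.pySetD xs i v) ((j : Nat) : Int) 0 =
      if ((j : Nat) : Int) = i then v else PySem.List.pyGetD xs ((j : Nat) : Int) 0 := by
  rw [PySem.List.pySetD_of_nonneg xs v hi, PySem.List.pyGetD_natCast, PySem.List.pyGetD_natCast]
  by_cases hj : ((j : Nat) : Int) = i
  · have h1 : i.toNat = j := by omega
    have h2 : i.toNat < xs.length := by omega
    rw [if_pos hj]
    subst h1
    simp [List.getD_eq_getElem?_getD, h2]
  · have h1 : ¬ (i.toNat = j) := by omega
    rw [if_neg hj]
    simp [List.getD_eq_getElem?_getD, h1]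

lemma fillStep_length (n : Int) (t : List Int) (kc : Int × Int) : (fillStep n t kc).length = t.length := by
  unfold fillStep
  split_ifs with h
  · exact PySem.List.length_pySetD ..
  · rfl

lemma fillT_length (n : Int) : ∀ (es : List Int) (s : Int) (t : List Int),
    ((PySem.List.enumerate es s).foldl (fillStep n) t).length = t.length := by
  intro es
  induction es with
  | nil => intro s t; simp [PySem.List.enumerate_nil]
  | cons c es ih =>
    intro s t
    rw [PySem.List.enumerate_cons, List.foldl_cons, ih, fillStep_length]

-- one fill step, read at a canonical position
lemma fillStep_getD (n : Int) (t : List Int) (q c : Int) (j : Nat)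
    (hlen : t.length = n.toNat) (hn : 1 ≤ n) (hc : 1 ≤ c ∧ c ≤ n) :
    PySem.List.pyGetD (fillStep n t (q, c)) ((j : Nat) : Int) 0 = PySem.List.pyGetD t ((j : Nat) : Int) 0 ∨
    (PySem.List.pyGetD t ((j : Nat) : Int) 0 = n ∧ ((j : Nat) : Int) = c - 1 ∧
      PySem.List.pyGetD (fillStep n t (q, c)) ((j : Nat) : Int) 0 = q) := by
  unfold fillStep
  simp only
  split_ifs with h
  · rw [getD_pySetD_int t (c-1) q j (by omega) (by rw [hlen]; omega)]
    split_ifs with hj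
    · right
      refine ⟨?_, hj, rfl⟩
      rw [hj]
      simpa using h
    · left; rfl
  · left; rfl

-- the fill pass only turns INF entries into values ≥ k0+1
lemma fillT_untouched (n : Int) (hn : 1 ≤ n) : ∀ (es : List Int) (k0 : Nat) (t : List Int),
    t.length = n.toNat → (∀ c ∈ es, 1 ≤ c ∧ c ≤ n) →
    ∀ j : Nat,
      PySem.List.pyGetD ((PySem.List.enumerate es ((k0 : Int)+1)).foldl (fillStep n) t) ((j : Nat) : Int) 0
        = PySem.List.pyGetD t ((j : Nat) : Int) 0 ∨
      (PySem.List.pyGetD t ((j : Nat) : Int) 0 = n ∧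
        (k0 : Int)+1 ≤ PySem.List.pyGetD ((PySem.List.enumerate es ((k0 : Int)+1)).foldl (fillStep n) t) ((j : Nat) : Int) 0) := by
  intro es
  induction es with
  | nil =>
    intro k0 t _ _ j
    left
    rw [PySem.List.enumerate_nil, List.foldl_nil]
  | cons c es ih =>
    intro k0 t hlen hb j
    rw [PySem.List.enumerate_cons, List.foldl_cons,
      show ((k0 : Int)+1)+1 = ((k0+1 : Nat) : Int)+1 from by push_cast; ring]
    have hlen' : (fillStep n t ((k0 : Int)+1, c)).length = n.toNat := by rw [fillStep_length, hlen]
    have hb' : ∀ c' ∈ es, 1 ≤ c' ∧ c' ≤ n := fun c' hc' => hb c' (List.mem_cons_of_mem _ hc')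
    have hone := fillStep_getD n t ((k0 : Int)+1) c j hlen hn (hb c (List.mem_cons_self ..))
    rcases ih (k0+1) (fillStep n t ((k0 : Int)+1, c)) hlen' hb' j with h | h
    · rcases hone with h1 | h1
      · left; rw [h, h1]
      · right; exact ⟨h1.1, by rw [h, h1.2.2]⟩
    · rcases hone with h1 | h1
      · rw [h1] at h
        right
        exact ⟨h.1, by have := h.2; push_cast at this ⊢; omega⟩
      · right
        refine ⟨h1.1, ?_⟩
        have := h.2; push_cast at this ⊢; omega

-- fill-pass characterization: after the fold, `t[j] ≤ K ↔ slot j was hit within the first K commands`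
lemma fillT_char (n : Int) :
    ∀ (es : List Int) (k0 : Nat) (t : List Int),
      t.length = n.toNat →
      (∀ j : Nat, j < n.toNat → (PySem.List.pyGetD t (j : Int) 0 = n ∨ PySem.List.pyGetD t (j : Int) 0 ≤ (k0 : Int))) →
      (∀ c ∈ es, 1 ≤ c ∧ c ≤ n) →
      ∀ (K : Int) (j : Nat), (k0 : Int) ≤ K → K ≤ (k0 : Int) + es.length → K < n → j < n.toNat →
        (PySem.List.pyGetD ((PySem.List.enumerate es ((k0 : Int)+1)).foldl (fillStep n) t) (j : Int) 0 ≤ K ↔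
          PySem.List.pyGetD t (j : Int) 0 ≤ K ∨ ((j : Int)+1) ∈ es.take (K - k0).toNat) := by
  intro es
  induction es with
  | nil =>
    intro k0 t hlen hent hb K j hK1 hK2 hKn hj
    rw [PySem.List.enumerate_nil, List.foldl_nil]
    simp
  | cons c es ih =>
    intro k0 t hlen hent hb K j hK1 hK2 hKn hj
    have hn : 1 ≤ n := by
      have := hb c (List.mem_cons_self ..); omega
    have hc := hb c (List.mem_cons_self ..)
    have hb' : ∀ c' ∈ es, 1 ≤ c' ∧ c' ≤ n := fun c' hc' => hb c' (List.mem_cons_of_mem _ hc')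
    rw [PySem.List.enumerate_cons, List.foldl_cons]
    set t' := fillStep n t ((k0 : Int)+1, c) with ht'def
    have hlen' : t'.length = n.toNat := by rw [ht'def, fillStep_length, hlen]
    -- reading t' at a canonical position
    have ht' : ∀ i : Nat, i < n.toNat →
        (PySem.List.pyGetD t' ((i : Nat) : Int) 0 ≤ K ↔
          (PySem.List.pyGetD t ((i : Nat) : Int) 0 ≤ K ∨ (((i : Nat) : Int) = c - 1 ∧ (k0 : Int)+1 ≤ K))) := by
      intro i hi
      rcases fillStep_getD n t ((k0 : Int)+1) c i hlen hn hc with h | h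
      · rw [← ht'def] at h
        rw [h]
        constructor
        · intro hh; exact Or.inl hh
        · rintro (hh | ⟨hh1, hh2⟩)
          · exact hh
          · -- t was not overwritten at i although i = c-1: then t[i] ≠ n, so t[i] ≤ k0 ≤ K
            rcases hent i hi with he | he
            · -- t[i] = n: fillStep would have written; but either way t'[i] = t[i] = n; contradiction with write not happening is not needed:
              -- from h : t'[i] = t[i]; unfold fillStep at t': if the guard held we'd have written (k0+1) at c-1 = i
              -- instead derive directly: guard = (t[c-1] == n); with i = c-1 and t[i] = n the guard holds and t'[i] = k0+1
              exfalso
              have hg : (PySem.List.pyGetD t (c - 1) 0 == n) = true := by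
                rw [← hh1, he]; simp
              have : t' = PySem.List.pySetD t (c-1) ((k0 : Int)+1) := by
                rw [ht'def]; unfold fillStep; rw [if_pos hg]
              rw [this, getD_pySetD_int t (c-1) _ i (by omega) (by rw [hlen]; omega), if_pos hh1] at h
              -- h : k0+1 = t[i] = n; but also t[i] = n means n = k0+1; then t'[i] = n ≤ K < n contradiction? use he : t[i] = n
              rw [he] at h
              omega
            · omega
      · rw [← ht'def] at h
        rw [h.2.2]
        constructor
        · intro hh; exact Or.inr ⟨h.2.1, hh⟩
        · rintro (hh | ⟨_, hh⟩)
          · rw [h.1] at hh; omega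
          · exact hh
    by_cases hKk : K = (k0 : Int)
    · -- no command of this suffix is counted yet
      have htake : (K - (k0 : Int)).toNat = 0 := by omega
      rw [htake, List.take_zero]
      simp only [List.not_mem_nil, or_false]
      have hu := fillT_untouched n hn es (k0+1) t' hlen' hb' j
      rw [show ((k0+1 : Nat) : Int)+1 = ((k0 : Int)+1)+1 from by push_cast; ring] at hu
      constructor
      · intro hh
        rcases hu with h | h
        · rw [h] at hh
          rcases (ht' j hj).mp hh with h2 | h2
          · exact h2
          · omega
        · omega
      · intro hh
        have hh' : PySem.List.pyGetD t' ((j : Nat) : Int) 0 ≤ K := (ht' j hj).mpr (Or.inl hh)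
        rcases hu with h | h
        · rw [h]; exact hh'
        · exfalso; rw [h.1] at hh'; omega
    · have hK0 : (k0 : Int)+1 ≤ K := by omega
      have key := ih (k0+1) t' hlen'
        (by
          intro i hi
          rcases fillStep_getD n t ((k0 : Int)+1) c i hlen hn hc with h | h
          · rw [← ht'def] at h
            rcases hent i hi with he | he
            · left; rw [h, he]
            · right; rw [h]; push_cast; omega
          · rw [← ht'def] at h
            right; rw [h.2.2]; push_cast; omega)
        hb' K j (by push_cast; omega)
        (by simp only [List.length_cons] at hK2; push_cast at hK2 ⊢; omega) hKn hj
      rw [show ((k0+1 : Nat) : Int)+1 = ((k0 : Int)+1)+1 from by push_cast; ring] at key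
      rw [key]
      have htake : (K - (k0 : Int)).toNat = ((K - ((k0 : Int)+1)).toNat) + 1 := by omega
      rw [htake, List.take_succ_cons, List.mem_cons]
      have hjc : (((j : Nat) : Int)+1 = c) ↔ (((j : Nat) : Int) = c - 1) := by omega
      rw [show (K - ((k0+1 : Nat) : Int)) = K - ((k0 : Int)+1) from by push_cast; ring]
      rw [ht' j hj]
      constructor
      · rintro ((hh | ⟨hh1, _⟩) | hh)
        · exact Or.inl hh
        · exact Or.inr (Or.inl (hjc.mpr hh1))
        · exact Or.inr (Or.inr hh)
      · rintro (hh | hh | hh)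
        · exact Or.inl (Or.inl hh)
        · exact Or.inl (Or.inr ⟨hjc.mp hh, hK0⟩)
        · exact Or.inr hh

-- main loop correspondence
lemma loop_eq (n : Int) (cmd : List Int) (hn : 1 ≤ n)
    (hpre : ∀ c ∈ cmd.take (n-1).toNat, 1 ≤ c ∧ c ≤ n) :
    ∀ (cs : List Int) (k : Nat) (l ans : List Int) (s : Int),
      cmd.drop k = cs →
      (k : Int) ≤ n - 1 →
      l.length = n.toNat →
      ans.length = (n+1).toNat →
      (∀ j : Nat, j < n.toNat →
        (PySem.List.pyGetD l (j : Int) 0 ≠ 0 ↔ ((j : Int)+1) ∈ (cmd.take (n-1).toNat).take k)) →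
      -1 ≤ s → s ≤ n - 1 →
      (0 ≤ s → PySem.List.pyGetD l s 0 = 0) →
      (∀ j : Nat, s < (j : Int) → j < n.toNat → PySem.List.pyGetD l (j : Int) 0 ≠ 0) →
      PySem.List.pyGetD ans (k : Int) 0 = max s 0 + (k : Int) + 2 - n →
      loopA cs l ans ((k : Int)+1) (max s 0) =
        (if (cmd.length : Int) ≥ n then
          PySem.List.pySetD
            ((PySem.List.pyRange ((k : Int)+1) (min (cmd.length : Int) (n-1) + 1) 1).foldl
              (sweep n ((PySem.List.enumerate (cmd.take (n-1).toNat) 1).foldl (fillStep n)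
                (List.replicate n.toNat n))) (s, ans)).2 n 1
        else
          ((PySem.List.pyRange ((k : Int)+1) (min (cmd.length : Int) (n-1) + 1) 1).foldl
            (sweep n ((PySem.List.enumerate (cmd.take (n-1).toNat) 1).foldl (fillStep n)
              (List.replicate n.toNat n))) (s, ans)).2) := by
  have ht_len : ((PySem.List.enumerate (cmd.take (n-1).toNat) 1).foldl (fillStep n)
      (List.replicate n.toNat n)).length = n.toNat := by
    rw [fillT_length, List.length_replicate]
  have hchar : ∀ (K : Int) (j : Nat), 0 ≤ K → K ≤ min (cmd.length : Int) (n-1) → K < n → j < n.toNat →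
      (PySem.List.pyGetD ((PySem.List.enumerate (cmd.take (n-1).toNat) 1).foldl (fillStep n)
          (List.replicate n.toNat n)) ((j : Nat) : Int) 0 ≤ K ↔
        ((j : Int)+1) ∈ (cmd.take (n-1).toNat).take K.toNat) := by
    intro K j hK0 hKm hKn hj
    have hslice_len : ((cmd.take (n-1).toNat).length : Int) = min (cmd.length : Int) (n-1) := by
      rw [List.length_take]; push_cast; omega
    have key := fillT_char n (cmd.take (n-1).toNat) 0 (List.replicate n.toNat n)
      (by rw [List.length_replicate])
      (by intro i hi; left
          rw [PySem.List.pyGetD_natCast, List.getD_eq_getElem?_getD]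
          simp [hi])
      hpre K j (by push_cast; omega) (by push_cast; omega) hKn hj
    rw [show ((0 : Nat) : Int)+1 = 1 from by norm_num, show K - ((0 : Nat) : Int) = K from by push_cast; ring] at key
    rw [key]
    have hrep : ¬ (PySem.List.pyGetD (List.replicate n.toNat n) ((j : Nat) : Int) 0 ≤ K) := by
      rw [PySem.List.pyGetD_natCast, List.getD_eq_getElem?_getD]
      simp [hj]
      omega
    tauto
  intro cs
  induction cs with
  | nil =>
    intro k l ans s hdrop hk _ _ _ _ _ _ _ _
    have hlen_le : cmd.length ≤ k := by
      by_contra h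
      have : (cmd.drop k).head? = cmd[k]? := List.head?_drop
      rw [hdrop] at this
      simp [List.getElem?_eq_getElem (by omega : k < cmd.length)] at this
    have hnotif : ¬ ((cmd.length : Int) ≥ n) := by push_cast; omega
    have hm : min (cmd.length : Int) (n-1) + 1 ≤ (k : Int) + 1 := by push_cast; omega
    rw [if_neg hnotif, PySem.List.pyRange_one_eq_nil hm, List.foldl_nil]
    rfl
  | cons c cs' ih =>
    intro k l ans s hdrop hk hllen halen hInvL hs1 hs2 hii hiii hak
    have hkc : cmd[k]? = some c := by
      have : (cmd.drop k).head? = cmd[k]? := List.head?_drop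
      rw [hdrop] at this
      exact this.symm
    have hklen : k < cmd.length := by
      by_contra h
      rw [List.getElem?_eq_none (by omega)] at hkc
      simp at hkc
    have hanslen : (ans.length : Int) = n + 1 := by rw [halen]; omega
    have hdrop' : cmd.drop (k+1) = cs' := by
      have : (cmd.drop k).tail = cmd.drop (k+1) := List.tail_drop
      rw [hdrop] at this
      simpa using this.symm
    by_cases hbreak : (k : Int) = n - 1
    · -- A breaks and writes ans[n] := 1; B's sweep range is empty and len(cmd) ≥ n holds
      have hif : (k : Int) + 1 = (ans.length : Int) - 1 := by omega
      show (if (k : Int)+1 = (ans.length : Int) - 1 then PySem.List.pySetD ans ((k : Int)+1) 1 else _) = _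
      rw [if_pos hif]
      have hge : (cmd.length : Int) ≥ n := by push_cast; omega
      have hm : min (cmd.length : Int) (n-1) + 1 ≤ (k : Int) + 1 := by push_cast; omega
      rw [if_pos hge, PySem.List.pyRange_one_eq_nil hm, List.foldl_nil]
      rw [show (k : Int) + 1 = n from by omega]
    · have hklt : (k : Int) < n - 1 := lt_of_le_of_ne hk hbreak
      have hif : ¬ ((k : Int) + 1 = (ans.length : Int) - 1) := by omega
      show (if (k : Int)+1 = (ans.length : Int) - 1 then _ else _) = _
      rw [if_neg hif]
      simp only []
      -- c is the (k+1)-st executed command, inside the slice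
      have hcs : c ∈ cmd.take (n-1).toNat := by
        have hsl : (cmd.take (n-1).toNat)[k]? = some c := by
          rw [List.getElem?_take, if_pos (by omega)]
          exact hkc
        exact List.mem_of_getElem? hsl
      have hc := hpre c hcs
      have hcc : 0 ≤ c - 1 ∧ c - 1 < n := ⟨by omega, by omega⟩
      have htakes : (cmd.take (n-1).toNat).take (k+1) = (cmd.take (n-1).toNat).take k ++ [c] := by
        rw [List.take_succ]
        congr
        rw [List.getElem?_take, if_pos (by omega), hkc]
        rfl
      -- reading the updated occupancy array
      have hl' : ∀ j : Nat, PySem.List.pyGetD (PySem.List.pySetD l (c-1) 1) ((j : Nat) : Int) 0 =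
          if ((j : Nat) : Int) = c - 1 then 1 else PySem.List.pyGetD l ((j : Nat) : Int) 0 :=
        fun j => getD_pySetD_int l (c-1) 1 j hcc.1 (by rw [hllen]; omega)
      have hInvL' : ∀ j : Nat, j < n.toNat →
          (PySem.List.pyGetD (PySem.List.pySetD l (c-1) 1) ((j : Nat) : Int) 0 ≠ 0 ↔
            ((j : Int)+1) ∈ (cmd.take (n-1).toNat).take (k+1)) := by
        intro j hj
        rw [hl' j, htakes, List.mem_append, List.mem_singleton]
        split_ifs with hjc
        · simp only [ne_eq, one_ne_zero, not_false_eq_true, true_iff]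
          right; omega
        · rw [hInvL j hj]
          constructor
          · exact Or.inl
          · rintro (h | h)
            · exact h
            · omega
      have hH' : ∀ j : Nat, j < n.toNat →
          (PySem.List.pyGetD (PySem.List.pySetD l (c-1) 1) ((j : Nat) : Int) 0 ≠ 0 ↔
            PySem.List.pyGetD ((PySem.List.enumerate (cmd.take (n-1).toNat) 1).foldl (fillStep n)
              (List.replicate n.toNat n)) ((j : Nat) : Int) 0 ≤ (k : Int)+1) := by
        intro j hj
        rw [hInvL' j hj, hchar ((k : Int)+1) j (by omega) (by push_cast; omega) (by omega) hj]
        rw [show ((k : Int)+1).toNat = k + 1 from by omega]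
      -- peel one sweep step on the B side
      have hpeel : PySem.List.pyRange ((k : Int)+1) (min (cmd.length : Int) (n-1) + 1) 1 =
          ((k : Int)+1) :: PySem.List.pyRange ((k : Int)+1+1) (min (cmd.length : Int) (n-1) + 1) 1 :=
        PySem.List.pyRange_one_cons (by push_cast; omega)
      rw [hpeel, List.foldl_cons]
      have hcast1 : ((k+1 : Nat) : Int) = (k : Int)+1 := by push_cast; ring
      have hget : ∀ v : Int, PySem.List.pyGetD (PySem.List.pySetD ans ((k : Int)+1) v) (((k+1 : Nat)) : Int) 0 = v := by
        intro v
        rw [getD_pySetD_int ans ((k : Int)+1) v (k+1) (by omega) (by omega), if_pos hcast1]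
      simp only [hcast1] at hget
      have hprevidx : (k : Int) + 1 - 1 = ((k : Nat) : Int) := by ring
      by_cases hA : c - 1 = max s 0
      · -- A touched the rightmost zero
        rw [if_neg (by simpa using hA)]
        by_cases hs0 : 0 ≤ s
        · -- the pointer is on a real zero
          have hmax : max s 0 = s := by omega
          have hsc : ((s.toNat : Nat) : Int) = s := by omega
          have hsltn : s.toNat < n.toNat := by omega
          have hl's : PySem.List.pyGetD (PySem.List.pySetD l (c-1) 1) ((s.toNat : Nat) : Int) 0 ≠ 0 := by
            rw [hl' s.toNat, if_pos (by omega)]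
            norm_num
          have hTs : PySem.List.pyGetD ((PySem.List.enumerate (cmd.take (n-1).toNat) 1).foldl (fillStep n)
              (List.replicate n.toNat n)) ((s.toNat : Nat) : Int) 0 ≤ (k : Int)+1 :=
            (hH' s.toNat hsltn).mp hl's
          have hs' : dropF ((PySem.List.enumerate (cmd.take (n-1).toNat) 1).foldl (fillStep n)
              (List.replicate n.toNat n)) ((k : Int)+1) (s+1).toNat =
              dropF ((PySem.List.enumerate (cmd.take (n-1).toNat) 1).foldl (fillStep n)
              (List.replicate n.toNat n)) ((k : Int)+1) s.toNat := by
            rw [show (s+1).toNat = s.toNat + 1 from by omega]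
            simp only [dropF]
            rw [if_pos hTs]
          set D := dropF ((PySem.List.enumerate (cmd.take (n-1).toNat) 1).foldl (fillStep n)
              (List.replicate n.toNat n)) ((k : Int)+1) s.toNat with hDdef
          have hDb := dropF_bounds ((PySem.List.enumerate (cmd.take (n-1).toNat) 1).foldl (fillStep n)
              (List.replicate n.toNat n)) ((k : Int)+1) s.toNat
          rw [← hDdef] at hDb
          have hscan := scanA_dropF (PySem.List.pySetD l (c-1) 1)
            ((PySem.List.enumerate (cmd.take (n-1).toNat) 1).foldl (fillStep n) (List.replicate n.toNat n))
            ((k : Int)+1) s.toNat 0 (fun j hj => hH' j (by omega)) hl's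
          rw [← hDdef] at hscan
          have hii' : 0 ≤ D → PySem.List.pyGetD (PySem.List.pySetD l (c-1) 1) D 0 = 0 := by
            intro hD0
            have hTD := dropF_pos ((PySem.List.enumerate (cmd.take (n-1).toNat) 1).foldl (fillStep n)
              (List.replicate n.toNat n)) ((k : Int)+1) s.toNat (by rw [← hDdef]; exact hD0)
            rw [← hDdef] at hTD
            have hDc : ((D.toNat : Nat) : Int) = D := by omega
            have := hH' D.toNat (by omega)
            rw [hDc] at this
            by_contra hne
            have := this.mp hne
            omega
          have hiii' : ∀ j : Nat, D < (j : Int) → j < n.toNat →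
              PySem.List.pyGetD (PySem.List.pySetD l (c-1) 1) ((j : Nat) : Int) 0 ≠ 0 := by
            intro j hDj hjn
            rcases lt_trichotomy j s.toNat with hj | hj | hj
            · have hTj := dropF_above ((PySem.List.enumerate (cmd.take (n-1).toNat) 1).foldl (fillStep n)
                (List.replicate n.toNat n)) ((k : Int)+1) s.toNat j (by rw [← hDdef]; exact hDj) hj
              exact (hH' j hjn).mpr hTj
            · rw [show j = s.toNat from hj]; exact hl's
            · rw [hl' j]
              split_ifs with hjc
              · norm_num
              · exact hiii j (by omega) hjn
          -- align A's written value and pointer with B's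
          rw [hmax, hscan, hprevidx, hak]
          have hval : max s 0 + (k : Int) + 2 - n - (0 + (s.toNat : Int) - max D 0) + 1
              = max D 0 + ((k : Int) + 1) + 2 - n := by rw [hmax, hsc]; ring
          rw [hval]
          have hDmax : ((((max D 0).toNat : Nat)) : Int) = max D 0 := by omega
          have IH := ih (k+1) (PySem.List.pySetD l (c-1) 1)
            (PySem.List.pySetD ans ((k : Int)+1) (max D 0 + ((k : Int)+1) + 2 - n)) D
            (by exact hdrop') (by push_cast; omega)
            (by rw [PySem.List.length_pySetD, hllen])
            (by rw [PySem.List.length_pySetD, halen])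
            hInvL'
            hDb.1 (by omega) hii' hiii'
            (by push_cast; rw [hget])
          rw [hcast1] at IH
          rw [hDmax, IH]
          -- and B's sweep step produces exactly that state
          simp only [sweep]
          rw [hs']
        · -- s = -1: no zero remains, the pointer is pinned at 0
          have hsm1 : s = -1 := by omega
          have hmax : max s 0 = 0 := by omega
          rw [hmax] at hA
          have hscan : scanA (PySem.List.pySetD l (c-1) 1) ((0 : Int).toNat) 0 = (0, 0) := rfl
          rw [hmax, hscan, hprevidx, hak, hmax]
          have hval : (0 : Int) + (k : Int) + 2 - n - 0 + 1 = 0 + ((k : Int)+1) + 2 - n := by ring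
          rw [hval]
          have hs' : dropF ((PySem.List.enumerate (cmd.take (n-1).toNat) 1).foldl (fillStep n)
              (List.replicate n.toNat n)) ((k : Int)+1) (s+1).toNat = -1 := by
            rw [hsm1]
            rfl
          have hiii' : ∀ j : Nat, (-1 : Int) < (j : Int) → j < n.toNat →
              PySem.List.pyGetD (PySem.List.pySetD l (c-1) 1) ((j : Nat) : Int) 0 ≠ 0 := by
            intro j _ hjn
            rw [hl' j]
            split_ifs with hjc
            · norm_num
            · exact hiii j (by omega) hjn
          have IH := ih (k+1) (PySem.List.pySetD l (c-1) 1)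
            (PySem.List.pySetD ans ((k : Int)+1) (0 + ((k : Int)+1) + 2 - n)) (-1)
            (by exact hdrop') (by push_cast; omega)
            (by rw [PySem.List.length_pySetD, hllen])
            (by rw [PySem.List.length_pySetD, halen])
            hInvL'
            (by omega) (by omega) (by intro h; exact absurd h (by norm_num)) hiii'
            (by push_cast; rw [hget]; norm_num)
          rw [hcast1] at IH
          rw [show ((((0, 0) : Nat × Int).1 : Nat) : Int) = max (-1 : Int) 0 from by norm_num]
          rw [IH]
          simp only [sweep]
          rw [hs']
          norm_num
      · -- A did not touch the rightmost zero: the pointer does not move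
        rw [if_pos (by simpa using hA)]
        have hs' : dropF ((PySem.List.enumerate (cmd.take (n-1).toNat) 1).foldl (fillStep n)
            (List.replicate n.toNat n)) ((k : Int)+1) (s+1).toNat = s := by
          by_cases hs0 : 0 ≤ s
          · rw [show (s+1).toNat = s.toNat + 1 from by omega]
            have hsc : ((s.toNat : Nat) : Int) = s := by omega
            have hl'0 : PySem.List.pyGetD (PySem.List.pySetD l (c-1) 1) ((s.toNat : Nat) : Int) 0 = 0 := by
              rw [hl' s.toNat, if_neg (by omega)]
              rw [hsc]
              exact hii hs0
            have hT : ¬ (PySem.List.pyGetD ((PySem.List.enumerate (cmd.take (n-1).toNat) 1).foldl (fillStep n)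
                (List.replicate n.toNat n)) ((s.toNat : Nat) : Int) 0 ≤ (k : Int)+1) := by
              intro hT
              exact absurd hl'0 ((hH' s.toNat (by omega)).mpr hT)
            simp only [dropF]
            rw [if_neg hT, hsc]
          · rw [show (s+1).toNat = 0 from by omega]
            simp only [dropF]
            omega
        rw [hprevidx, hak]
        have hval : max s 0 + (k : Int) + 2 - n + 1 = max s 0 + ((k : Int)+1) + 2 - n := by ring
        rw [hval]
        have hii' : 0 ≤ s → PySem.List.pyGetD (PySem.List.pySetD l (c-1) 1) s 0 = 0 := by
          intro hs0
          have hsc : ((s.toNat : Nat) : Int) = s := by omega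
          rw [← hsc, hl' s.toNat, if_neg (by omega), hsc]
          exact hii hs0
        have hiii' : ∀ j : Nat, s < (j : Int) → j < n.toNat →
            PySem.List.pyGetD (PySem.List.pySetD l (c-1) 1) ((j : Nat) : Int) 0 ≠ 0 := by
          intro j hsj hjn
          rw [hl' j]
          split_ifs with hjc
          · norm_num
          · exact hiii j hsj hjn
        have IH := ih (k+1) (PySem.List.pySetD l (c-1) 1)
          (PySem.List.pySetD ans ((k : Int)+1) (max s 0 + ((k : Int)+1) + 2 - n)) s
          (by exact hdrop') (by push_cast; omega)
          (by rw [PySem.List.length_pySetD, hllen])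
          (by rw [PySem.List.length_pySetD, halen])
          hInvL'
          hs1 hs2 hii' hiii'
          (by push_cast; rw [hget])
        rw [hcast1] at IH
        rw [IH]
        simp only [sweep]
        rw [hs']

lemma pyGetD_ans0 (m : Nat) :
    PySem.List.pyGetD (PySem.List.pySetD (List.replicate (m+1) (0 : Int)) 0 1) ((0 : Nat) : Int) 0 = 1 := by
  rw [List.replicate_succ]
  simp [PySem.List.pySetD_of_nonneg _ _ (le_refl (0 : Int))]

-- ===== VERDICT (by name: the statement is the Claim_ definition above) =====
theorem check_spec : Claim_equal_check := by
  unfold Claim_equal_check Spec_check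
  intro n cmd _ hpre
  obtain ⟨hn0, hz, hcmds⟩ := hpre
  rcases lt_or_eq_of_le hn0 with hn | hn
  · -- 1 ≤ n
    have hn1 : (1 : Int) ≤ n := hn
    obtain ⟨m, hm⟩ : ∃ m : Nat, (n+1).toNat = m + 1 := ⟨n.toNat, by omega⟩
    have hak := pyGetD_ans0 m
    rw [← hm] at hak
    have key := loop_eq n cmd hn1 hcmds cmd 0
      (List.replicate n.toNat 0)
      (PySem.List.pySetD (List.replicate (n+1).toNat 0) 0 1)
      (n-1)
      (List.drop_zero)
      (by omega)
      (by rw [List.length_replicate])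
      (by rw [PySem.List.length_pySetD, List.length_replicate])
      (by
        intro j hj
        rw [PySem.List.pyGetD_natCast, List.getD_eq_getElem?_getD]
        simp [hj])
      (by omega) (by omega)
      (by
        intro h0
        rw [PySem.List.pyGetD_eq_getElem _ 0 h0 (by rw [List.length_replicate]; omega)]
        simp)
      (by intro j h1 h2; exfalso; omega)
      (by rw [hak]; push_cast; omega)
    push_cast at key
    norm_num at key
    unfold check check_alt
    dsimp only
    rw [if_pos hn1, PySem.List.slice_to cmd (by omega : (0:Int) ≤ n - 1)]
    rw [List.length_replicate, Int.toNat_of_nonneg hn0]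
    rw [show n - 1 = max (n-1) 0 from by omega]
    rw [key]
    simp only [show max (n-1) 0 = n - 1 from by omega, show (n-1).toNat = n.toNat - 1 from by omega,
      ge_iff_le]
  · -- n = 0: cmd = []
    have hc := hz hn.symm
    subst hc
    rw [← hn]
    decide
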